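-- pv_equiv track=rewrite | github.com/nastyakashko1509/AaDS_project | Topic_2_task_1_python/solution_2.py | get_possible_sums
-- ===== SOURCE A (Python) =====
-- def get_possible_sums(coins: list[int]) -> set[int]:
--     possible_sums = {0}
--     for coin in coins:
--         new_sums = set()
--         for s in possible_sums:
--             new_sums.add(s + coin)
--         possible_sums.update(new_sums)
--     return possible_sums
-- ===== SOURCE B (Python) =====
-- def get_possible_sums(coins: list[int]) -> set[int]:
--     if not coins:
--         return {0}
--     if len(coins) == 1:
--         return {0, coins[0]}
--     mid = len(coins) // 2
--     left = get_possible_sums(coins[:mid])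
--     right = get_possible_sums(coins[mid:])
--     return {a + b for b in right for a in left}
-- ===== Notes on version B (the rewrite author's own statement) =====
-- stated objective: alternative
-- what changed: replaced A's single left-to-right set accumulation with a divide-and-conquer that recursively computes the subset-sum sets of the two halves and merges them by a Cartesian pairwise sum; B can be slower than A when the sum-sets collapse, since each merge enumerates |L|*|R| pairs
import Mathlib
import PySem

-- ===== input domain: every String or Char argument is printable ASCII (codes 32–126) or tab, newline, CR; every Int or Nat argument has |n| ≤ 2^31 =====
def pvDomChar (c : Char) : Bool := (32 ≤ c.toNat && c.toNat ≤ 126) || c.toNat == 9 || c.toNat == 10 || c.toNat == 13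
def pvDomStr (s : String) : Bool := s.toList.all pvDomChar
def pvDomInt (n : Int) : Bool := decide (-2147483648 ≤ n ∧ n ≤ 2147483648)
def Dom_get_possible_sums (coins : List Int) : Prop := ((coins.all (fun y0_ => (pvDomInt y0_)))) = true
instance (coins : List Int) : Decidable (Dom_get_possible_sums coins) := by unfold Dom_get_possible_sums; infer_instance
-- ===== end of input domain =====

-- B replaces A's left-to-right set accumulation by divide-and-conquer over the two halves,
-- merged by a Cartesian pairwise sum (alternative decomposition, no speed claim).
-- Python returns a set; the proved equality is about the port's element list (insertion order).

-- ===== PORT A =====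
def get_possible_sums (coins : List Int) : List Int :=
  coins.foldl
    (fun possible_sums coin =>
      let new_sums := possible_sums.foldl
        (fun ns s => PySem.Set.add ns (s + coin)) (PySem.Set.empty : PySem.Set Int)
      PySem.Set.update possible_sums new_sums)
    (PySem.Set.add (PySem.Set.empty : PySem.Set Int) 0)

-- ===== PORT B =====
def get_possible_sums_alt (coins : List Int) : List Int :=
  if _h : coins.length ≤ 1 then
    match coins with
    | [] => PySem.Set.add (PySem.Set.empty : PySem.Set Int) 0
    | c :: _ => PySem.Set.add (PySem.Set.add (PySem.Set.empty : PySem.Set Int) 0) c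
  else
    let mid := coins.length / 2
    let left := get_possible_sums_alt (coins.take mid)
    let right := get_possible_sums_alt (coins.drop mid)
    PySem.Set.ofList (right.flatMap (fun b => left.map (fun a => a + b)))
termination_by coins.length
decreasing_by
  · simp only [List.length_take]; omega
  · simp only [List.length_drop]; omega

-- ===== PRECONDITION & SPEC =====
def Spec_get_possible_sums (coins : List Int) (out : List Int) : Prop := out = get_possible_sums_alt coins
instance (coins : List Int) (out : List Int) : Decidable (Spec_get_possible_sums coins out) := by unfold Spec_get_possible_sums; infer_instance

-- ===== CLAIM (what is proved, stated in full; the proofs are below) =====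
def Claim_equal_get_possible_sums : Prop := ∀ (coins : List Int), Dom_get_possible_sums coins → Spec_get_possible_sums coins (get_possible_sums coins)

-- ===== LEMMAS AND PROOFS =====

-- `pvKeep s l`: the elements of l not in s, first occurrences, in order — the suffix Set.add folding appends to s.
def pvKeep (s : List Int) : List Int → List Int
  | [] => []
  | a :: l => if a ∈ s then pvKeep s l else a :: pvKeep (s ++ [a]) l

-- the un-deduplicated sum sequence A's loop walks through (subset sums in increasing-bitmask order)
def pvRaw (coins : List Int) : List Int :=
  coins.foldl (fun acc c => acc ++ acc.map (· + c)) [0]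

theorem pvKeep_foldl_add (l s : List Int) :
    List.foldl PySem.Set.add s l = s ++ pvKeep s l := by
  induction l generalizing s with
  | nil => simp [pvKeep]
  | cons a l ih =>
    simp only [List.foldl_cons, pvKeep]
    by_cases h : a ∈ s
    · simp [PySem.Set.add, h, ih]
    · simp [PySem.Set.add, h, ih (s ++ [a])]

theorem pvMem_append_keep (v : List Int) (s : List Int) (y : Int) (hy : y ∈ v) :
    y ∈ s ++ pvKeep s v := by
  induction v generalizing s with
  | nil => cases hy
  | cons a v ih =>
    simp only [pvKeep]
    by_cases h : a ∈ s
    · rcases List.mem_cons.mp hy with rfl | hy'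
      · simp [h]
      · simpa [h] using ih s hy'
    · rcases List.mem_cons.mp hy with rfl | hy'
      · simp [h]
      · have := ih (s ++ [a]) hy'
        simp only [h, if_false]
        simp only [List.mem_append, List.mem_cons] at this ⊢
        tauto

theorem pvKeep_eq_nil (v : List Int) (s : List Int) (h : ∀ y ∈ v, y ∈ s) :
    pvKeep s v = [] := by
  induction v with
  | nil => rfl
  | cons a v ih =>
    simp only [pvKeep, h a (by simp), if_true]
    exact ih (fun y hy => h y (by simp [hy]))

theorem pvKeep_append (u v s : List Int) :
    pvKeep s (u ++ v) = pvKeep s u ++ pvKeep (s ++ pvKeep s u) v := by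
  induction u generalizing s with
  | nil => simp [pvKeep]
  | cons a u ih =>
    simp only [List.cons_append, pvKeep]
    by_cases h : a ∈ s
    · simp [h, ih]
    · simp only [h, if_false, List.cons_append]
      rw [ih (s ++ [a])]
      simp [List.append_assoc]

theorem pvKeep_map_keep (f : Int → Int) (u : List Int) (s t : List Int)
    (h : ∀ x ∈ t, f x ∈ s) :
    pvKeep s ((pvKeep t u).map f) = pvKeep s (u.map f) := by
  induction u generalizing s t with
  | nil => rfl
  | cons a u ih =>
    simp only [pvKeep, List.map_cons]
    by_cases hat : a ∈ t
    · simp only [hat, if_true, h a hat]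
      exact ih s t h
    · by_cases hfs : f a ∈ s
      · simp only [hat, if_false, List.map_cons, pvKeep, hfs, if_true]
        refine ih s (t ++ [a]) ?_
        intro x hx
        rcases List.mem_append.mp hx with hx | hx
        · exact h x hx
        · simp at hx; subst hx; exact hfs
      · simp only [hat, if_false, List.map_cons, pvKeep, hfs, if_false]
        congr 1
        refine ih (s ++ [f a]) (t ++ [a]) ?_
        intro x hx
        rcases List.mem_append.mp hx with hx | hx
        · simp [h x hx]
        · simp at hx; subst hx; simp

theorem pvKeep_keep (u s t : List Int) (h : ∀ x ∈ t, x ∈ s) :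
    pvKeep s (pvKeep t u) = pvKeep s u := by
  have := pvKeep_map_keep (fun x => x) u s t h
  simpa using this

theorem pvKeep_flatMap_keep (g : Int → List Int) (u : List Int) (s t : List Int)
    (h : ∀ x ∈ t, ∀ y ∈ g x, y ∈ s) :
    pvKeep s ((pvKeep t u).flatMap g) = pvKeep s (u.flatMap g) := by
  induction u generalizing s t with
  | nil => rfl
  | cons a u ih =>
    simp only [pvKeep, List.flatMap_cons]
    by_cases hat : a ∈ t
    · simp only [hat, if_true]
      rw [pvKeep_append, pvKeep_eq_nil (g a) s (h a hat)]
      simp only [List.nil_append, List.append_nil]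
      exact ih s t h
    · simp only [hat, if_false, List.flatMap_cons, pvKeep_append]
      congr 1
      refine ih (s ++ pvKeep s (g a)) (t ++ [a]) ?_
      intro x hx y hy
      rcases List.mem_append.mp hx with hx | hx
      · have := h x hx y hy
        simp [this]
      · simp at hx
        rw [hx] at hy
        exact pvMem_append_keep (g a) s y hy

theorem pvKeep_flatMap_congr (g g' : Int → List Int) (u : List Int)
    (h : ∀ b, ∀ s' : List Int, pvKeep s' (g b) = pvKeep s' (g' b)) (s : List Int) :
    pvKeep s (u.flatMap g) = pvKeep s (u.flatMap g') := by
  induction u generalizing s with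
  | nil => rfl
  | cons a u ih =>
    simp only [List.flatMap_cons, pvKeep_append, h a s]
    rw [ih]

theorem pvRaw_foldl (ys : List Int) (acc : List Int) :
    ys.foldl (fun acc c => acc ++ acc.map (· + c)) acc
      = (pvRaw ys).flatMap (fun r => acc.map (· + r)) := by
  induction ys generalizing acc with
  | nil => simp [pvRaw]
  | cons c ys ih =>
    simp only [List.foldl_cons]
    rw [ih]
    have h2 : pvRaw (c :: ys) = (pvRaw ys).flatMap (fun r => [r, c + r]) := by
      have h3 := ih [0, 0 + c]
      simp only [pvRaw, List.foldl_cons]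
      simpa using h3
    rw [h2, List.flatMap_assoc]
    have h4 : (fun r => (acc ++ acc.map (· + c)).map (· + r))
        = (fun r => [r, c + r].flatMap (fun r' => acc.map (· + r'))) := by
      funext r
      simp [List.map_map]
    rw [h4]

theorem pvRaw_append (xs ys : List Int) :
    pvRaw (xs ++ ys) = (pvRaw ys).flatMap (fun r => (pvRaw xs).map (· + r)) := by
  simp only [pvRaw, List.foldl_append]
  exact pvRaw_foldl ys _

theorem pvStepA (t : List Int) (c : Int) :
    PySem.Set.update (pvKeep [] t)
        ((pvKeep [] t).foldl (fun ns s => PySem.Set.add ns (s + c)) (PySem.Set.empty : PySem.Set Int))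
      = pvKeep [] (t ++ t.map (· + c)) := by
  have hinner : (pvKeep [] t).foldl (fun ns s => PySem.Set.add ns (s + c))
      (PySem.Set.empty : PySem.Set Int) = pvKeep [] ((pvKeep [] t).map (· + c)) := by
    rw [← List.foldl_map]
    simpa [PySem.Set.empty] using pvKeep_foldl_add ((pvKeep [] t).map (· + c)) []
  simp only [hinner]
  show PySem.Set.update (pvKeep [] t) (pvKeep [] ((pvKeep [] t).map (· + c)))
      = pvKeep [] (t ++ t.map (· + c))
  rw [show ∀ (s x : List Int), PySem.Set.update s x = x.foldl PySem.Set.add s from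
    fun s x => rfl]
  rw [pvKeep_foldl_add, pvKeep_keep _ _ [] (by simp),
    pvKeep_map_keep (· + c) t (pvKeep [] t) [] (by simp), pvKeep_append]
  simp

theorem pvA_eq_aux (coins t : List Int) :
    coins.foldl
      (fun possible_sums coin =>
        let new_sums := possible_sums.foldl
          (fun ns s => PySem.Set.add ns (s + coin)) (PySem.Set.empty : PySem.Set Int)
        PySem.Set.update possible_sums new_sums)
      (pvKeep [] t)
    = pvKeep [] (coins.foldl (fun acc c => acc ++ acc.map (· + c)) t) := by
  induction coins generalizing t with
  | nil => rfl
  | cons c coins ih =>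
    simp only [List.foldl_cons]
    rw [show (PySem.Set.update (pvKeep [] t)
        ((pvKeep [] t).foldl (fun ns s => PySem.Set.add ns (s + c))
          (PySem.Set.empty : PySem.Set Int)))
      = pvKeep [] (t ++ t.map (· + c)) from pvStepA t c]
    exact ih (t ++ t.map (· + c))

theorem pvA_eq (coins : List Int) : get_possible_sums coins = pvKeep [] (pvRaw coins) := by
  have h0 : (PySem.Set.add (PySem.Set.empty : PySem.Set Int) 0) = pvKeep [] [0] := rfl
  simpa [get_possible_sums, pvRaw, h0] using pvA_eq_aux coins [0]

theorem pvB_eq_aux (n : Nat) : ∀ (coins : List Int), coins.length ≤ n →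
    get_possible_sums_alt coins = pvKeep [] (pvRaw coins) := by
  induction n with
  | zero =>
    intro coins h
    have : coins = [] := by cases coins <;> simp_all
    subst this
    rw [get_possible_sums_alt]
    rfl
  | succ n ih =>
    intro coins hlen
    rw [get_possible_sums_alt]
    by_cases h : coins.length ≤ 1
    · simp only [h, dif_pos]
      match coins, h with
      | [], _ => rfl
      | [c], _ =>
        show PySem.Set.add (PySem.Set.add (PySem.Set.empty : PySem.Set Int) 0) c
          = pvKeep [] (pvRaw [c])
        have hraw : pvRaw [c] = [0, 0 + c] := rfl
        rw [hraw]
        by_cases hc : c = 0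
        · subst hc; rfl
        · simp only [zero_add]
          show (if PySem.Set.contains [0] c then [0] else [0] ++ [c])
            = pvKeep [] (0 :: [c])
          have h1 : ¬ PySem.Set.contains ([0] : List Int) c := by
            simp [hc]
          have h2 : pvKeep [] (0 :: [c]) = [0, c] := by
            simp [pvKeep, hc]
          simp [h2, hc]
    · simp only [h]
      have h2 : 2 ≤ coins.length := by omega
      have hmid1 : (coins.take (coins.length / 2)).length ≤ n := by
        simp only [List.length_take]; omega
      have hmid2 : (coins.drop (coins.length / 2)).length ≤ n := by
        simp only [List.length_drop]; omega
      rw [ih _ hmid1, ih _ hmid2]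
      rw [show ∀ xs : List Int, PySem.Set.ofList xs = xs.foldl PySem.Set.add [] from
        fun xs => rfl]
      rw [pvKeep_foldl_add, List.nil_append]
      rw [pvKeep_flatMap_keep _ _ [] [] (by simp)]
      rw [pvKeep_flatMap_congr _ (fun b => (pvRaw (coins.take (coins.length / 2))).map (fun a => a + b)) _
        (fun b s' => pvKeep_map_keep (fun a => a + b) _ s' [] (by simp))]
      rw [← pvRaw_append, List.take_append_drop]
      simp

theorem pvB_eq (coins : List Int) : get_possible_sums_alt coins = pvKeep [] (pvRaw coins) :=
  pvB_eq_aux coins.length coins le_rfl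

-- ===== VERDICT (by name: the statement is the Claim_ definition above) =====
theorem get_possible_sums_spec : Claim_equal_get_possible_sums := by
  intro coins _
  unfold Spec_get_possible_sums
  rw [pvA_eq, pvB_eq]
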